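-- pv_equiv track=rewrite | github.com/SauravC99/MusicBox | soundofmusic.py | note_to_scale
-- ===== SOURCE A (Python) =====
-- MAJOR_SCALE_INTERVALS = [2, 2, 1, 2, 2, 2, 1]
--
-- MINOR_SCALE_INTERVALS = [2, 1, 2, 2, 1, 2, 2]
--
-- def note_to_scale(note, type):
--     #Makes a new list
--     notes = []
--     #If the scale is minor, change values according to minor list and append to notes
--     if type == "minor":
--         #Adds the first note to list
--         notes.append(note)
--         for i in MINOR_SCALE_INTERVALS:
--             #Adds and apends
--             note += i
--             notes.append(note)
--     #If the scale is major, change values according to major list and append to notes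
--     if type == "major":
--         #Adds the first note to list
--         notes.append(note)
--         for i in MAJOR_SCALE_INTERVALS:
--             #Adds and apends
--             note += i
--             notes.append(note)
--     #Return the list
--     return notes
-- ===== SOURCE B (Python) =====
-- # B: table of absolute scale offsets (prefix sums of the interval lists) + a single
-- # lookup-and-add comprehension; unknown scale types map to the empty list.
-- SCALE_OFFSETS = {
--     "major": [0, 2, 4, 5, 7, 9, 11, 12],
--     "minor": [0, 2, 3, 5, 7, 8, 10, 12],
-- }
--
-- def note_to_scale(note, type):
--     return [note + off for off in SCALE_OFFSETS.get(type, [])]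
-- ===== Notes on version B (the rewrite author's own statement) =====
-- stated objective: simpler
-- what changed: Replaces the two duplicated if-blocks that mutate a running note while appending with a single table of precomputed absolute offsets (prefix sums of the intervals) and one lookup-plus-add comprehension.
import Mathlib
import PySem

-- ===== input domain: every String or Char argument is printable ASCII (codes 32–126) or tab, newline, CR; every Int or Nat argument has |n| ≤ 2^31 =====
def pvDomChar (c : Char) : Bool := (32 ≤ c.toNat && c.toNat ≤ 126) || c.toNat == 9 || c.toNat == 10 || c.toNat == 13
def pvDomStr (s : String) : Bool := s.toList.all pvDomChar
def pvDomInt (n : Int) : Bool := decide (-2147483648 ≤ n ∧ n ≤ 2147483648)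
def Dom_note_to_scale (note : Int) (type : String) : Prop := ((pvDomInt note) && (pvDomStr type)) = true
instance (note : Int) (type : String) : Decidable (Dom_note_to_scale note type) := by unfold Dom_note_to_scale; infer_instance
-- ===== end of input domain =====

-- ===== PORT A =====
-- B builds the scale from a table of absolute offsets instead of A's duplicated
-- mutate-and-append loops; objective: simpler.
def MAJOR_SCALE_INTERVALS : List Int := [2, 2, 1, 2, 2, 2, 1]
def MINOR_SCALE_INTERVALS : List Int := [2, 1, 2, 2, 1, 2, 2]

def note_to_scale (note : Int) (type : String) : List Int :=
  let notes : List Int := []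
  let (notes, note) :=
    if type = "minor" then
      MINOR_SCALE_INTERVALS.foldl
        (fun (s : List Int × Int) i => (s.1 ++ [s.2 + i], s.2 + i))
        (notes ++ [note], note)
    else (notes, note)
  let (notes, _note) :=
    if type = "major" then
      MAJOR_SCALE_INTERVALS.foldl
        (fun (s : List Int × Int) i => (s.1 ++ [s.2 + i], s.2 + i))
        (notes ++ [note], note)
    else (notes, note)
  notes

-- ===== PORT B =====
def SCALE_OFFSETS : PySem.Dict String (List Int) :=
  (PySem.Dict.empty).insert "major" [0, 2, 4, 5, 7, 9, 11, 12]
    |>.insert "minor" [0, 2, 3, 5, 7, 8, 10, 12]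

def note_to_scale_alt (note : Int) (type : String) : List Int :=
  (SCALE_OFFSETS.getD type []).map (fun off => note + off)

-- ===== PRECONDITION & SPEC =====
def Spec_note_to_scale (note : Int) (type : String) (out : List Int) : Prop := out = note_to_scale_alt note type
instance (note : Int) (type : String) (out : List Int) : Decidable (Spec_note_to_scale note type out) := by unfold Spec_note_to_scale; infer_instance

-- ===== CLAIM (what is proved, stated in full; the proofs are below) =====
def Claim_equal_note_to_scale : Prop := ∀ (note : Int) (type : String), Dom_note_to_scale note type → Spec_note_to_scale note type (note_to_scale note type)

-- ===== LEMMAS AND PROOFS =====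

-- ===== VERDICT (by name: the statement is the Claim_ definition above) =====
theorem note_to_scale_spec : Claim_equal_note_to_scale := by
  intro note type _
  unfold Spec_note_to_scale note_to_scale note_to_scale_alt SCALE_OFFSETS
  unfold MAJOR_SCALE_INTERVALS MINOR_SCALE_INTERVALS
  by_cases h1 : type = "minor" <;> by_cases h2 : type = "major"
  · subst h1; simp at h2
  · simp [h1, PySem.Dict.getD, PySem.Dict.get?, PySem.Dict.insert, PySem.Dict.empty,
      List.foldl]
    omega
  · simp [h2, PySem.Dict.getD, PySem.Dict.get?, PySem.Dict.insert, PySem.Dict.empty,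
      List.foldl]
    omega
  · have b1 : (("minor" : String) == type) = false := beq_eq_false_iff_ne.mpr (fun h => h1 h.symm)
    have b2 : (("major" : String) == type) = false := beq_eq_false_iff_ne.mpr (fun h => h2 h.symm)
    simp [h1, h2, b1, b2, PySem.Dict.getD, PySem.Dict.get?, PySem.Dict.insert,
      PySem.Dict.empty, List.find?]
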